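-- pv_equiv track=rewrite | github.com/kolzchut/srm-etl | operators/derive/to_dp.py | safe_reorder_responses_by_category
-- ===== SOURCE A (Python) =====
-- def safe_reorder_responses_by_category(responses, category):
--     if not responses:
--         return []
--
--     matches = []
--     others = []
--
--     for r in responses:
--         # Safely split. If ID is None or doesn't have a colon, it goes to 'others'
--         parts = r.get('id', '').split(':')
--
--         # Check if we have enough parts AND if the category matches
--         if len(parts) > 1 and parts[1] == category:
--             matches.append(r)
--         else:
--             others.append(r)
--
--     return matches + others
-- ===== SOURCE B (Python) =====
-- def safe_reorder_responses_by_category(responses, category):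
--     def key(r):
--         parts = r.get('id', '').split(':')
--         return 0 if len(parts) > 1 and parts[1] == category else 1
--     # Python's sort is stable: matches (key 0) come first, each group in original order.
--     return sorted(responses, key=key)
-- ===== Notes on version B (the rewrite author's own statement) =====
-- stated objective: simpler
-- what changed: Replaces the two-accumulator partition loop (matches/others lists concatenated at the end) with a single stable sort keyed 0/1 on the same category-match predicate, relying on sort stability to preserve relative order within each group.
import Mathlib
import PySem

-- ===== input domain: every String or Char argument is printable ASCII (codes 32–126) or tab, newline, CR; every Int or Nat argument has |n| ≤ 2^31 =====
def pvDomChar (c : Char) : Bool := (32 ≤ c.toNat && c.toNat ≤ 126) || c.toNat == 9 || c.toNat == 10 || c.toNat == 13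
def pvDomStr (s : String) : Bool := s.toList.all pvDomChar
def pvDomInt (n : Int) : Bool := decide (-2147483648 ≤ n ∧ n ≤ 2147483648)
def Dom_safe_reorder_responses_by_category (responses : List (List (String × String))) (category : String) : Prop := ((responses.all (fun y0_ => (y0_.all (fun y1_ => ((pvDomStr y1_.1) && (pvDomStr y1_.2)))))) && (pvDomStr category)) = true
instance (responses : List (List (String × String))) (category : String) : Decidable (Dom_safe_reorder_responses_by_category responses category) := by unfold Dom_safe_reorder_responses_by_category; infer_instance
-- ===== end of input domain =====

-- B replaces A's two-accumulator partition loop with one stable sort keyed 0/1 on the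
-- same predicate (objective: simpler); return values proved equal on all inputs.

-- ===== PORT A =====
-- r.get('id', ''): first-match lookup in the association list (exact: a Python dict has unique keys)
def pvGetId (r : List (String × String)) : String :=
  match r.find? (fun kv => kv.1 == "id") with
  | some kv => kv.2
  | none => ""

-- the guard both Pythons spell identically: parts = r.get('id','').split(':'); len(parts) > 1 and parts[1] == category
def pvMatchId (category : String) (r : List (String × String)) : Bool :=
  -- ':' is a nonempty separator, so split? is always `some`; getD [] merely totalizes
  let parts : List String := (PySem.Str.split? (pvGetId r) ":").getD []
  decide (1 < parts.length) && (parts.getD 1 "" == category)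

def safe_reorder_responses_by_category (responses : List (List (String × String))) (category : String) : List (List (String × String)) :=
  if responses = [] then []
  else
    let st := responses.foldl
      (fun (acc : List (List (String × String)) × List (List (String × String))) r =>
        if pvMatchId category r then (acc.1 ++ [r], acc.2) else (acc.1, acc.2 ++ [r]))
      ([], [])
    st.1 ++ st.2

-- ===== PORT B =====
def pvKey (category : String) (r : List (String × String)) : Int :=
  if pvMatchId category r then 0 else 1

def safe_reorder_responses_by_category_alt (responses : List (List (String × String))) (category : String) : List (List (String × String)) :=
  PySem.List.sorted responses (pvKey category) false

-- ===== PRECONDITION & SPEC =====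
def Spec_safe_reorder_responses_by_category (responses : List (List (String × String))) (category : String) (out : List (List (String × String))) : Prop := out = safe_reorder_responses_by_category_alt responses category
instance (responses : List (List (String × String))) (category : String) (out : List (List (String × String))) : Decidable (Spec_safe_reorder_responses_by_category responses category out) := by unfold Spec_safe_reorder_responses_by_category; infer_instance

-- ===== CLAIM (what is proved, stated in full; the proofs are below) =====
def Claim_equal_safe_reorder_responses_by_category : Prop := ∀ (responses : List (List (String × String))) (category : String), Dom_safe_reorder_responses_by_category responses category → Spec_safe_reorder_responses_by_category responses category (safe_reorder_responses_by_category responses category)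

-- ===== LEMMAS AND PROOFS =====

-- A's loop: both accumulators only grow at the tail, so the final state is the two filters.
lemma pv_foldl_part {α : Type} (p : α → Bool) (l : List α) (m o : List α) :
    l.foldl (fun (acc : List α × List α) r =>
        if p r then (acc.1 ++ [r], acc.2) else (acc.1, acc.2 ++ [r])) (m, o)
      = (m ++ l.filter p, o ++ l.filter (fun r => !p r)) := by
  induction l generalizing m o with
  | nil => simp
  | cons x t ih =>
    by_cases h : p x = true <;>
      simp [List.foldl_cons, h, ih]

-- inserting into (all-key-0 ++ all-key-1): a key-0 element lands between the groups,
-- a key-1 element at the very end.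
lemma pv_insert01 {α : Type} (p : α → Bool) (x : α) (fp fn : List α)
    (hfp : ∀ a ∈ fp, p a = true) (hfn : ∀ a ∈ fn, p a = false) :
    PySem.List.insertBy
        (fun a b => decide ((if p a then (0:Int) else 1) < (if p b then (0:Int) else 1)))
        x (fp ++ fn)
      = if p x then fp ++ x :: fn else (fp ++ fn) ++ [x] := by
  by_cases hx : p x = true
  · simp only [hx, if_pos]
    induction fp with
    | nil =>
      cases fn with
      | nil => simp [PySem.List.insertBy]
      | cons y ys =>
        have hy := hfn y (by simp)
        simp [PySem.List.insertBy, hx, hy]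
    | cons m ms ih =>
      have hm := hfp m (by simp)
      have hrest := ih (fun a ha => hfp a (List.mem_cons_of_mem _ ha))
      simp [PySem.List.insertBy, hm, hx, hrest]
  · rw [PySem.List.insertBy_of_forall_not_before, if_neg hx]
    intro y hy
    rcases List.mem_append.mp hy with h | h
    · simp [hx, hfp y h]
    · simp [hx, hfn y h]

-- B's sort: insertion sort with the 0/1 key builds exactly filter-matched ++ filter-others.
lemma pv_sorted01 {α : Type} (p : α → Bool) (xs : List α) :
    PySem.List.sorted xs (fun r => if p r then (0:Int) else 1) false
      = xs.filter p ++ xs.filter (fun r => !p r) := by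
  rw [PySem.List.sorted_eq_foldl_insertBy]
  induction xs using List.reverseRecOn with
  | nil => simp
  | append_singleton t x ih =>
    rw [List.foldl_append, List.foldl_cons, List.foldl_nil, ih,
        pv_insert01 p x _ _
          (fun a ha => (List.mem_filter.mp ha).2)
          (fun a ha => by simpa using (List.mem_filter.mp ha).2)]
    by_cases hx : p x = true <;>
      simp [hx, List.filter_append]

-- ===== VERDICT (by name: the statement is the Claim_ definition above) =====
theorem safe_reorder_responses_by_category_spec : Claim_equal_safe_reorder_responses_by_category := by
  intro responses category _
  unfold Spec_safe_reorder_responses_by_category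
  unfold safe_reorder_responses_by_category safe_reorder_responses_by_category_alt
  have hB : PySem.List.sorted responses (pvKey category) false
      = responses.filter (pvMatchId category)
        ++ responses.filter (fun r => !pvMatchId category r) := by
    have := pv_sorted01 (pvMatchId category) responses
    simpa [pvKey] using this
  cases responses with
  | nil => simp [hB]
  | cons r rs =>
    simp only [if_neg (List.cons_ne_nil r rs)]
    rw [pv_foldl_part (pvMatchId category) (r :: rs) [] []]
    simp [hB]
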